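-- pv_equiv track=rewrite | github.com/samburney/pyupload | app/lib/file_serving.py | is_inline_mimetype
-- ===== SOURCE A (Python) =====
-- ALLOWED_INLINE_MIMETYPES = [
--     "image/*",
--     "video/*",
--     "audio/*",
--     "application/pdf",
--     "text/plain",
-- ]
--
-- def is_inline_mimetype(mimetype: str) -> bool:
--     """
--     Check if a mimetype is allowed to be displayed inline.
--     """
--     for allowed in ALLOWED_INLINE_MIMETYPES:
--         if allowed.endswith("/*"):
--             if mimetype.startswith(allowed[:-1]):
--                 return True
--         elif mimetype == allowed:
--             return True
--     return False
-- ===== SOURCE B (Python) =====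
-- ALLOWED_INLINE_MIMETYPES = [
--     "image/*",
--     "video/*",
--     "audio/*",
--     "application/pdf",
--     "text/plain",
-- ]
--
-- def is_inline_mimetype(mimetype: str) -> bool:
--     """
--     Check if a mimetype is allowed to be displayed inline.
--     """
--     # Parse the mimetype instead of scanning allowed patterns:
--     # split off the top-level type at the first '/' and test it.
--     top, sep, _ = mimetype.partition("/")
--     if sep and top in ("image", "video", "audio"):
--         return True
--     return mimetype in ("application/pdf", "text/plain")
-- ===== Notes on version B (the rewrite author's own statement) =====
-- stated objective: alternative
-- what changed: B parses the input instead of scanning patterns: it partitions the mimetype at its first '/' and tests whether the top-level type is image/video/audio (wildcard case), falling back to a two-literal exact check; A instead loops over the allowed-pattern list classifying each entry as wildcard or exact and doing a startswith/equality per entry.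
import Mathlib
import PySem

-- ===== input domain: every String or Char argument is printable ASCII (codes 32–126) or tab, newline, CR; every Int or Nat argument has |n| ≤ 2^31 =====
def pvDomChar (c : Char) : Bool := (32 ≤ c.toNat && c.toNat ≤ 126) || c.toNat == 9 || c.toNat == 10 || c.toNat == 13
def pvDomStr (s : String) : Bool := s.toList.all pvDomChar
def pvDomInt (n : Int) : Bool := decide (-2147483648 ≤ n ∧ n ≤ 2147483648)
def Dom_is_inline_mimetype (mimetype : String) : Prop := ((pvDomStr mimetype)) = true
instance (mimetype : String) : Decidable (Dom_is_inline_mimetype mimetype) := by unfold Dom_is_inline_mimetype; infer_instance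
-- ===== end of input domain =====

-- B parses the input (partition at the first '/', test the top-level type) instead of
-- A's loop over the allowed-pattern list with a wildcard/exact branch per entry; objective: alternative.

-- ===== PORT A =====
def ALLOWED_INLINE_MIMETYPES : List String :=
  ["image/*", "video/*", "audio/*", "application/pdf", "text/plain"]

-- the for-loop of A, step for step: wildcard branch first, else exact comparison
def isInlineLoopA (mimetype : String) : List String → Bool
  | [] => false
  | allowed :: rest =>
    if PySem.Str.endswith allowed "/*" then
      if PySem.Str.startswith mimetype (String.ofList allowed.toList.dropLast) then true
      else isInlineLoopA mimetype rest
    else if mimetype == allowed then true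
    else isInlineLoopA mimetype rest

def is_inline_mimetype (mimetype : String) : Bool :=
  isInlineLoopA mimetype ALLOWED_INLINE_MIMETYPES

-- ===== PORT B =====
-- hand port of str.partition("/"): returns (text before the first '/', whether a '/' was found);
-- exact for a one-character separator (the dropped third component is unused by B)
def partSlash : List Char → (List Char × Bool)
  | [] => ([], false)
  | c :: rest =>
    if c = '/' then ([], true)
    else
      let (t, b) := partSlash rest
      (c :: t, b)

def is_inline_mimetype_alt (mimetype : String) : Bool :=
  let (top, sep) := partSlash mimetype.toList
  if sep && (top == "image".toList || top == "video".toList || top == "audio".toList) then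
    true
  else
    mimetype == "application/pdf" || mimetype == "text/plain"

-- ===== PRECONDITION & SPEC =====
def Spec_is_inline_mimetype (mimetype : String) (out : Bool) : Prop := out = is_inline_mimetype_alt mimetype
instance (mimetype : String) (out : Bool) : Decidable (Spec_is_inline_mimetype mimetype out) := by unfold Spec_is_inline_mimetype; infer_instance

-- ===== CLAIM (what is proved, stated in full; the proofs are below) =====
def Claim_equal_is_inline_mimetype : Prop := ∀ (mimetype : String), Dom_is_inline_mimetype mimetype → Spec_is_inline_mimetype mimetype (is_inline_mimetype mimetype)

-- ===== LEMMAS AND PROOFS =====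

-- mimetype starts with w++"/" (w slash-free) iff partSlash finds '/' with exactly w before it
theorem part_startswith (w : List Char) (hw : '/' ∉ w) :
    ∀ (l : List Char), ((w ++ ['/']) <+: l) ↔ partSlash l = (w, true) := by
  induction w with
  | nil =>
    intro l
    cases l with
    | nil => simp [partSlash]
    | cons c r =>
      rcases hpr : partSlash r with ⟨t, b⟩
      simp only [List.nil_append, partSlash, hpr]
      by_cases hc : c = '/'
      · subst hc
        simp [List.cons_prefix_cons]
      · simp only [List.cons_prefix_cons, if_neg hc, Prod.mk.injEq]
        constructor
        · rintro ⟨h, -⟩; exact absurd h.symm hc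
        · rintro ⟨h, -⟩; exact (List.cons_ne_nil _ _ h).elim
  | cons a w' ih =>
    intro l
    have ha : a ≠ '/' := fun h => hw (h ▸ List.mem_cons_self)
    have hw' : '/' ∉ w' := fun h => hw (List.mem_cons_of_mem _ h)
    cases l with
    | nil => simp [partSlash]
    | cons c r =>
      rcases hpr : partSlash r with ⟨t, b⟩
      simp only [List.cons_append, List.cons_prefix_cons, partSlash, hpr]
      by_cases hc : c = '/'
      · subst hc
        simp [ha]
      · have hih := ih hw' r
        rw [hpr] at hih
        simp only [if_neg hc, Prod.mk.injEq, List.cons.injEq]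
        constructor
        · rintro ⟨rfl, hpre⟩
          have := hih.mp hpre
          rw [Prod.mk.injEq] at this
          exact ⟨⟨rfl, this.1⟩, this.2⟩
        · rintro ⟨⟨rfl, rfl⟩, rfl⟩
          exact ⟨rfl, hih.mpr rfl⟩

theorem sw_eq (m : String) (w : List Char) (hw : '/' ∉ w) :
    PySem.Str.startswith m (String.ofList (w ++ ['/'])) = decide (partSlash m.toList = (w, true)) := by
  have h := part_startswith w hw m.toList
  by_cases hp : partSlash m.toList = (w, true)
  · have hs : PySem.Chars.startswith m.toList (w ++ ['/']) = true :=
      (PySem.Chars.startswith_iff _ _).mpr (h.mpr hp)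
    simp [hp, hs]
  · have hs : PySem.Chars.startswith m.toList (w ++ ['/']) = false := by
      cases hc : PySem.Chars.startswith m.toList (w ++ ['/'])
      · rfl
      · exact absurd (h.mp ((PySem.Chars.startswith_iff _ _).mp hc)) hp
    simp [hp, hs]

-- ===== VERDICT (by name: the statement is the Claim_ definition above) =====
theorem is_inline_mimetype_spec : Claim_equal_is_inline_mimetype := by
  intro m _
  unfold Spec_is_inline_mimetype is_inline_mimetype is_inline_mimetype_alt ALLOWED_INLINE_MIMETYPES
  simp only [isInlineLoopA,
    show PySem.Str.endswith "image/*" "/*" = true from by decide,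
    show PySem.Str.endswith "video/*" "/*" = true from by decide,
    show PySem.Str.endswith "audio/*" "/*" = true from by decide,
    show PySem.Str.endswith "application/pdf" "/*" = false from by decide,
    show PySem.Str.endswith "text/plain" "/*" = false from by decide,
    if_true, Bool.false_eq_true, if_false]
  rw [show String.ofList ("image/*" : String).toList.dropLast
        = String.ofList ("image".toList ++ ['/']) from by decide,
      show String.ofList ("video/*" : String).toList.dropLast
        = String.ofList ("video".toList ++ ['/']) from by decide,
      show String.ofList ("audio/*" : String).toList.dropLast
        = String.ofList ("audio".toList ++ ['/']) from by decide,
      sw_eq m "image".toList (by decide),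
      sw_eq m "video".toList (by decide),
      sw_eq m "audio".toList (by decide)]
  rcases hp : partSlash m.toList with ⟨top, sep⟩
  cases sep
  · simp [Prod.mk.injEq, Bool.beq_eq_decide_eq]
  · simp only [Prod.mk.injEq, and_true, Bool.true_and]
    by_cases h1 : top = "image".toList <;>
    by_cases h2 : top = "video".toList <;>
    by_cases h3 : top = "audio".toList <;>
    simp [h1, h2, h3, Bool.beq_eq_decide_eq, Bool.or_assoc]
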